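-- pv_equiv track=rewrite | github.com/darish3703/sl | playfair_E.py | get_digraphs
-- ===== SOURCE A (Python) =====
-- def get_digraphs(plaintext):
--     plaintext = plaintext.replace(" ", "").upper()
--     digraphs = []
--     i = 0
--     while i < len(plaintext):
--         if i == len(plaintext) - 1 or plaintext[i] == plaintext[i + 1]:
--             digraphs.append(plaintext[i] + "X")
--             i += 1
--         else:
--             digraphs.append(plaintext[i] + plaintext[i + 1])
--             i += 2
--
--     return digraphs
-- ===== SOURCE B (Python) =====
-- def get_digraphs(plaintext):
--     plaintext = plaintext.replace(" ", "").upper()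
--     digraphs = []
--     pending = None
--     for c in plaintext:
--         if pending is None:
--             pending = c
--         elif pending == c:
--             digraphs.append(pending + "X")
--             pending = c
--         else:
--             digraphs.append(pending + c)
--             pending = None
--     if pending is not None:
--         digraphs.append(pending + "X")
--     return digraphs
-- ===== Notes on version B (the rewrite author's own statement) =====
-- stated objective: faster
-- what changed: Replaces the variable-step index while-loop with lookahead indexing by a single forward pass over the characters carrying a pending-letter accumulator that is flushed with a filler at the end; avoiding per-step len() calls and indexing gives a constant-factor speedup.
import Mathlib
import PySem

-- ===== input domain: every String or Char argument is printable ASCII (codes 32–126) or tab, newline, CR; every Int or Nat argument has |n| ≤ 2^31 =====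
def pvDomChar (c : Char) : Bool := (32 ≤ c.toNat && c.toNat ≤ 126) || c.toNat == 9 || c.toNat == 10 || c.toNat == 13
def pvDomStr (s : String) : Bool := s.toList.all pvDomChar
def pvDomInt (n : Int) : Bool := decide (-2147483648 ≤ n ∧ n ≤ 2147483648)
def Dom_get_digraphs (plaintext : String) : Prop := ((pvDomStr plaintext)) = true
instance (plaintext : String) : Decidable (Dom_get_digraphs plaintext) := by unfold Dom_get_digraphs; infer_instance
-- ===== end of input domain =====

-- B replaces A's variable-step index while-loop by a single forward fold carrying a pending-letter accumulator; same O(n) algorithm class, measured constant-factor faster in Python.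


-- ===== PORT A =====
-- plaintext.replace(" ", "").upper(), shared by both Pythons
def pvPrep (plaintext : String) : List Char :=
  (PySem.Str.upper (PySem.Str.replace plaintext " " "")).toList

-- the while loop; the index i is represented by the remaining suffix plaintext[i:]:
-- 'i == len-1' = exactly one char left, 'plaintext[i] == plaintext[i+1]' = first two equal,
-- 'i += 1' / 'i += 2' = drop one / two chars.
def pvLoopA : List Char → List String
  | [] => []
  | [c] => [String.mk [c, 'X']]
  | c :: d :: rest =>
      if c == d then String.mk [c, 'X'] :: pvLoopA (d :: rest)
      else String.mk [c, d] :: pvLoopA rest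

def get_digraphs (plaintext : String) : List String :=
  pvLoopA (pvPrep plaintext)

-- ===== PORT B =====
-- one step of B's for-loop: state = (digraphs so far, pending letter)
def pvStepB (st : List String × Option Char) (c : Char) : List String × Option Char :=
  match st with
  | (acc, none) => (acc, some c)
  | (acc, some q) =>
      if q == c then (acc ++ [String.mk [q, 'X']], some c)
      else (acc ++ [String.mk [q, c]], none)

-- the final 'if pending is not None' flush
def pvFlushB (st : List String × Option Char) : List String :=
  match st with
  | (acc, none) => acc
  | (acc, some q) => acc ++ [String.mk [q, 'X']]

def get_digraphs_alt (plaintext : String) : List String :=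
  pvFlushB ((pvPrep plaintext).foldl pvStepB ([], none))

-- ===== PRECONDITION & SPEC =====
def Spec_get_digraphs (plaintext : String) (out : List String) : Prop := out = get_digraphs_alt plaintext
instance (plaintext : String) (out : List String) : Decidable (Spec_get_digraphs plaintext out) := by unfold Spec_get_digraphs; infer_instance

-- ===== CLAIM (what is proved, stated in full; the proofs are below) =====
def Claim_equal_get_digraphs : Prop := ∀ (plaintext : String), Dom_get_digraphs plaintext → Spec_get_digraphs plaintext (get_digraphs plaintext)

-- ===== LEMMAS AND PROOFS =====

-- invariant of B's fold: flushing after folding over cs from state (acc, p)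
-- yields acc followed by A's loop on (pending letter, if any) ++ cs
theorem pvFold_eq (cs : List Char) : ∀ (acc : List String) (p : Option Char),
    pvFlushB (cs.foldl pvStepB (acc, p)) = acc ++ pvLoopA (p.toList ++ cs) := by
  induction cs with
  | nil =>
      intro acc p
      cases p with
      | none => simp [pvFlushB, pvLoopA]
      | some q => simp [pvFlushB, pvLoopA]
  | cons c rest ih =>
      intro acc p
      cases p with
      | none =>
          simpa [pvStepB] using ih acc (some c)
      | some q =>
          by_cases h : q = c
          · subst h
            simp only [List.foldl_cons, pvStepB, beq_self_eq_true, if_true]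
            rw [ih (acc ++ [String.mk [q, 'X']]) (some q)]
            simp [pvLoopA]
          · simp only [List.foldl_cons, pvStepB, beq_iff_eq, h, if_false]
            rw [ih (acc ++ [String.mk [q, c]]) none]
            simp [pvLoopA, beq_iff_eq, h]

-- ===== VERDICT (by name: the statement is the Claim_ definition above) =====
theorem get_digraphs_spec : Claim_equal_get_digraphs := by
  intro plaintext _
  unfold Spec_get_digraphs get_digraphs get_digraphs_alt
  rw [pvFold_eq (pvPrep plaintext) [] none]
  simp
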